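-- pv_equiv track=rewrite | github.com/lewisjiang/citation-graph | citation_graph.py | parse_ref_two_authors
-- ===== SOURCE A (Python) =====
-- def parse_ref_two_authors(aunms, auids):
--     au1 = au2 = '-'
--     if aunms:
--         aunms_raw = [x.strip() for x in aunms.split(";")]
--         auids_raw = [str(j) for j in range(len(aunms_raw))]
--
--         if auids:
--             auids_raw = [x.strip() for x in auids.split(";")]
--             assert len(aunms_raw) == len(auids_raw)
--
--         auid_set = set()
--         authors = []
--         for aa in range(len(aunms_raw)):
--             if auids_raw[aa] not in auid_set:
--                 authors.append(aunms_raw[aa])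
--                 auid_set.add(auids_raw[aa])
--
--         if len(authors) > 1:
--             au1 = authors[0]
--             au2 = authors[-1]
--         elif len(authors) == 1:
--             au1 = authors[0]
--     return au1, au2
-- ===== SOURCE B (Python) =====
-- def parse_ref_two_authors(aunms, auids):
--     # Backward scan: no seen-set and no authors list; the last distinct author is the
--     # name at the largest index whose id occurs for the first time there.
--     if not aunms:
--         return '-', '-'
--     names = [x.strip() for x in aunms.split(";")]
--     if auids:
--         ids = [x.strip() for x in auids.split(";")]
--         assert len(names) == len(ids)
--     else:
--         ids = [str(j) for j in range(len(names))]
--     i = len(ids) - 1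
--     while ids.index(ids[i]) != i:
--         i -= 1
--     return names[0], (names[i] if i > 0 else '-')
-- ===== Notes on version B (the rewrite author's own statement) =====
-- stated objective: simpler
-- what changed: Replaces A's seen-set plus materialised distinct-authors list (then indexed at 0 and -1) with a single backward scan that finds the largest index whose id is a first occurrence via ids.index, returning names[0] and that name directly.
import Mathlib
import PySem

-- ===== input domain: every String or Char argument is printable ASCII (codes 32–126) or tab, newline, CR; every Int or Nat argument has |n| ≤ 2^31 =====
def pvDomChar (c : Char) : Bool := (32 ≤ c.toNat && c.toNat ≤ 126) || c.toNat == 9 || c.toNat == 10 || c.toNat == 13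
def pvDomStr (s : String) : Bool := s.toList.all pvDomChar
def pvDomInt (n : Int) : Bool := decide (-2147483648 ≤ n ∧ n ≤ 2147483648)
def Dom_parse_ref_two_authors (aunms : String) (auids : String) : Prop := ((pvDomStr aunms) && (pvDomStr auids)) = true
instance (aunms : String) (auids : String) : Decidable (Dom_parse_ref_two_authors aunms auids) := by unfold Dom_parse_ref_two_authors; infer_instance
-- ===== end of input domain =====

-- B replaces A's seen-set + materialised distinct-authors list with a backward scan for the
-- largest first-occurrence index (objective: simpler).

-- ===== PORT A =====
-- the body of A's for-loop: state = (auid_set, authors); Python appends to authors then adds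
-- to the set — same resulting pair (strings ported as List Char via PySem.Chars, exact on Dom)
def pvStepA (names ids : List (List Char)) (st : PySem.Set (List Char) × List (List Char))
    (aa : Int) : PySem.Set (List Char) × List (List Char) :=
  if PySem.Set.contains st.1 (PySem.List.pyGetD ids aa []) then st
  else (PySem.Set.add st.1 (PySem.List.pyGetD ids aa []), st.2 ++ [PySem.List.pyGetD names aa []])

def parse_ref_two_authors (aunms : String) (auids : String) : String × String :=
  if aunms.toList ≠ [] then
    let aunms_raw := (PySem.Chars.splitOn aunms.toList [';']).map (fun x => PySem.Chars.strip x)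
    let auids_raw :=
      if auids.toList ≠ [] then (PySem.Chars.splitOn auids.toList [';']).map (fun x => PySem.Chars.strip x)
      else (PySem.List.pyRange 0 (aunms_raw.length : Int) 1).map (fun j => PySem.Int.toChars j)
    -- the assert is Pre_'s: lengths are equal on admitted inputs
    let res := (PySem.List.pyRange 0 (aunms_raw.length : Int) 1).foldl (pvStepA aunms_raw auids_raw) (PySem.Set.empty, [])
    if res.2.length > 1 then
      (String.ofList (PySem.List.pyGetD res.2 0 ['-']), String.ofList (PySem.List.pyGetD res.2 (-1) ['-']))
    else if res.2.length = 1 then (String.ofList (PySem.List.pyGetD res.2 0 ['-']), "-")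
    else ("-", "-")
  else ("-", "-")

-- ===== PORT B =====
-- B's while-loop 'while ids.index(ids[i]) != i: i -= 1'; at i = 0 the condition is always
-- false (ids[0] is its own first occurrence), so the 0 case returns 0.
-- List.getD is exact for ids[i] here: i is a Nat in range on every call B makes.
def pvLastNew (ids : List (List Char)) : Nat → Nat
  | 0 => 0
  | i+1 => if PySem.List.index? ids (ids.getD (i+1) []) = some (i+1) then i+1 else pvLastNew ids i

def parse_ref_two_authors_alt (aunms : String) (auids : String) : String × String :=
  if aunms.toList = [] then ("-", "-")
  else
    let names := (PySem.Chars.splitOn aunms.toList [';']).map (fun x => PySem.Chars.strip x)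
    let ids :=
      if auids.toList ≠ [] then (PySem.Chars.splitOn auids.toList [';']).map (fun x => PySem.Chars.strip x)
      else (PySem.List.pyRange 0 (names.length : Int) 1).map (fun j => PySem.Int.toChars j)
    let i := pvLastNew ids (ids.length - 1)
    (String.ofList (names.getD 0 []), if i > 0 then String.ofList (names.getD i []) else "-")

-- ===== PRECONDITION & SPEC =====
-- Pre_ excludes exactly the inputs where A's assert fails (both programs raise AssertionError):
-- nonempty aunms and auids whose ';'-splits have different lengths.
def Pre_parse_ref_two_authors (aunms : String) (auids : String) : Prop :=
  aunms.toList ≠ [] → auids.toList ≠ [] →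
    (PySem.Chars.splitOn aunms.toList [';']).length = (PySem.Chars.splitOn auids.toList [';']).length
instance (aunms : String) (auids : String) : Decidable (Pre_parse_ref_two_authors aunms auids) := by
  unfold Pre_parse_ref_two_authors; infer_instance
def pvWitness_parse_ref_two_authors : String × String := ("Ann Lee; Bo Xu; Ann Lee", "a1; b2; a1")

def Spec_parse_ref_two_authors (aunms : String) (auids : String) (out : String × String) : Prop :=
  out = parse_ref_two_authors_alt aunms auids
instance (aunms : String) (auids : String) (out : String × String) : Decidable (Spec_parse_ref_two_authors aunms auids out) := by
  unfold Spec_parse_ref_two_authors; infer_instance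

-- ===== CLAIM (what is proved, stated in full; the proofs are below) =====
def Claim_equal_parse_ref_two_authors : Prop := ∀ (aunms : String) (auids : String), Dom_parse_ref_two_authors aunms auids → Pre_parse_ref_two_authors aunms auids → Spec_parse_ref_two_authors aunms auids (parse_ref_two_authors aunms auids)

-- ===== LEMMAS AND PROOFS =====

-- splitOn never returns the empty list
theorem pv_go_ne_nil (sep : List Char) : ∀ (fuel : Nat) (l cur : List Char) (acc : List (List Char)),
    PySem.Chars.splitOn.go sep fuel l cur acc ≠ [] := by
  intro fuel
  induction fuel with
  | zero => intro l cur acc; simp [PySem.Chars.splitOn.go]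
  | succ f ih =>
    intro l cur acc
    cases l with
    | nil => simp [PySem.Chars.splitOn.go]
    | cons c rest =>
      simp only [PySem.Chars.splitOn.go]
      split
      · exact ih _ _ _
      · exact ih _ _ _

theorem pv_splitOn_ne_nil (s sep : List Char) : PySem.Chars.splitOn s sep ≠ [] :=
  pv_go_ne_nil sep _ s [] []

-- 'the id at position j occurs there for the first time'
def pvNew (ids : List (List Char)) (j : Nat) : Bool := decide (ids.getD j [] ∉ ids.take j)

-- first-occurrence indices among the first k positions
def pvIdxs (ids : List (List Char)) (k : Nat) : List Nat := (List.range k).filter (pvNew ids)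

theorem pv_idxs_succ (ids : List (List Char)) (k : Nat) :
    pvIdxs ids (k+1) = pvIdxs ids k ++ if pvNew ids k then [k] else [] := by
  unfold pvIdxs
  rw [List.range_succ, List.filter_append, List.filter_singleton]
  cases h : pvNew ids k <;> simp

theorem pv_newAt_iff (ids : List (List Char)) (j : Nat) (hj : j < ids.length) :
    PySem.List.index? ids (ids.getD j []) = some j ↔ ids.getD j [] ∉ ids.take j := by
  rw [PySem.List.index?_eq_some_iff]
  constructor
  · rintro ⟨pre, suf, h, hlen, hnot⟩
    have : ids.take j = pre := by rw [h, ← hlen, List.take_left]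
    rwa [this]
  · intro hnot
    refine ⟨ids.take j, ids.drop (j+1), ?_, ?_, hnot⟩
    · conv_lhs => rw [← List.take_append_drop j ids]
      rw [List.getD_eq_getElem ids [] hj, List.drop_eq_getElem_cons hj]
    · simp [List.length_take, Nat.min_eq_left (Nat.le_of_lt hj)]

-- A's fold over range k computes (set of first k ids, names at first-occurrence indices)
theorem pv_fold_char (names ids : List (List Char)) :
    ∀ (k : Nat), k ≤ ids.length →
    ((List.range k).map (fun (j : Nat) => (j : Int))).foldl (pvStepA names ids) (PySem.Set.empty, []) =
      (PySem.Set.ofList (ids.take k), (pvIdxs ids k).map (fun j => names.getD j [])) := by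
  intro k
  induction k with
  | zero => intro _; simp [pvIdxs, PySem.Set.ofList, PySem.Set.empty]
  | succ k ih =>
    intro hk
    have hk' : k < ids.length := hk
    have hmap : ((List.range (k+1)).map (fun (j : Nat) => (j : Int))) =
        ((List.range k).map (fun (j : Nat) => (j : Int))) ++ [((k : Nat) : Int)] := by
      simp [List.range_succ]
    rw [hmap, List.foldl_append, ih (Nat.le_of_lt hk'), pv_idxs_succ]
    have hcont : (PySem.Set.contains (PySem.Set.ofList (ids.take k)) (ids.getD k []) = true) ↔
        ids.getD k [] ∈ ids.take k := by
      simp [PySem.Set.contains, PySem.Set.mem_ofList]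
    have hgd : ids.getD k [] = ids[k] := List.getD_eq_getElem ids [] hk'
    have htake : ids.take (k+1) = ids.take k ++ [ids.getD k []] := by
      rw [hgd, List.take_add_one, List.getElem?_eq_getElem hk']
      rfl
    have hofl : PySem.Set.ofList (ids.take (k+1)) =
        PySem.Set.add (PySem.Set.ofList (ids.take k)) (ids.getD k []) := by
      rw [htake, PySem.Set.ofList_eq_foldl, List.foldl_append, ← PySem.Set.ofList_eq_foldl]
      rfl
    simp only [List.foldl_cons, List.foldl_nil, pvStepA, PySem.List.pyGetD_natCast]
    by_cases hm : ids.getD k [] ∈ ids.take k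
    · rw [if_pos (hcont.mpr hm), hofl, PySem.Set.add, if_pos (hcont.mpr hm)]
      have : pvNew ids k = false := by simp only [pvNew, decide_eq_false_iff_not, Decidable.not_not]; exact hm
      simp only [this, Bool.false_eq_true, if_false, List.append_nil]
    · have hcf : ¬ (PySem.Set.contains (PySem.Set.ofList (ids.take k)) (ids.getD k []) = true) :=
        fun h => hm (hcont.mp h)
      rw [if_neg hcf, hofl, PySem.Set.add, if_neg hcf]
      have : pvNew ids k = true := by simp only [pvNew, decide_eq_true_eq]; exact hm
      simp only [this, if_true, List.map_append, List.map_cons, List.map_nil]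

-- B's backward scan finds the last element of pvIdxs
theorem pv_lastNew_eq (ids : List (List Char)) :
    ∀ (k : Nat), k < ids.length → pvLastNew ids k = (pvIdxs ids (k+1)).getLastD 0 := by
  intro k
  induction k with
  | zero =>
    intro _
    have h0 : pvNew ids 0 = true := by simp [pvNew]
    simp [pvLastNew, pvIdxs, h0, List.range_succ]
  | succ k ih =>
    intro hk
    have hk' : k < ids.length := Nat.lt_of_succ_lt hk
    rw [pv_idxs_succ]
    have hiff := pv_newAt_iff ids (k+1) hk
    have hred : pvLastNew ids (k+1) =
        if PySem.List.index? ids (ids.getD (k+1) []) = some (k+1) then k+1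
        else pvLastNew ids k := rfl
    rw [hred]
    by_cases h : ids.getD (k+1) [] ∈ ids.take (k+1)
    · have hnf : pvNew ids (k+1) = false := by
        simp only [pvNew, decide_eq_false_iff_not, Decidable.not_not]; exact h
      rw [if_neg (fun hc => (hiff.mp hc) h), hnf, if_neg (by simp), List.append_nil]
      exact ih hk'
    · have hnt : pvNew ids (k+1) = true := by
        simp only [pvNew, decide_eq_true_eq]; exact h
      rw [if_pos (hiff.mpr h), hnt, if_pos rfl, List.getLastD_concat]

-- structure of pvIdxs at a positive bound: 0, then only positive indices
theorem pv_idxs_cons (ids : List (List Char)) (m : Nat) :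
    pvIdxs ids (m+1) = 0 :: ((List.range m).map Nat.succ).filter (pvNew ids) := by
  unfold pvIdxs
  rw [List.range_succ_eq_map]
  have h0 : pvNew ids 0 = true := by simp [pvNew]
  simp [h0]

theorem pv_idxs_rest_pos (ids : List (List Char)) (m : Nat) :
    ∀ x ∈ ((List.range m).map Nat.succ).filter (pvNew ids), 0 < x := by
  intro x hx
  have hx' := List.mem_of_mem_filter hx
  obtain ⟨y, _, rfl⟩ := List.mem_map.mp hx'
  exact Nat.succ_pos y

-- pyGetD at index -1 is the last element
theorem pv_pyGetD_neg_one {α : Type} (xs : List α) (d : α) (h : xs ≠ []) :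
    PySem.List.pyGetD xs (-1) d = xs.getLastD d := by
  have hlen : 0 < xs.length := List.length_pos_iff.mpr h
  simp only [PySem.List.pyGetD, PySem.List.pyGet?, PySem.List.pyIdx?]
  rw [if_neg (by omega), if_pos (by simp; omega)]
  have h1 : (-(-1 : Int)).toNat = 1 := rfl
  simp only [h1, Option.bind_some,
    List.getElem?_eq_getElem (by omega : xs.length - 1 < xs.length)]
  simp [List.getLastD_eq_getLast?, List.getLast?_eq_getElem?,
    List.getElem?_eq_getElem (by omega : xs.length - 1 < xs.length)]

-- pyGetD at index 0 is the head
theorem pv_pyGetD_zero {α : Type} (xs : List α) (d : α) :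
    PySem.List.pyGetD xs 0 d = xs.getD 0 d := by
  have := PySem.List.pyGetD_natCast xs 0 d
  simpa using this

-- the generic core: A's branch computation equals B's on any names/ids of equal positive length
theorem pv_core (names ids : List (List Char)) (hlen : ids.length = names.length)
    (hpos : 0 < names.length) :
    (let res := (PySem.List.pyRange 0 (names.length : Int) 1).foldl (pvStepA names ids) (PySem.Set.empty, []);
     if res.2.length > 1 then
       (String.ofList (PySem.List.pyGetD res.2 0 ['-']), String.ofList (PySem.List.pyGetD res.2 (-1) ['-']))
     else if res.2.length = 1 then (String.ofList (PySem.List.pyGetD res.2 0 ['-']), "-")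
     else ("-", "-")) =
    (let i := pvLastNew ids (ids.length - 1);
     (String.ofList (names.getD 0 []), if i > 0 then String.ofList (names.getD i []) else "-")) := by
  have hle : names.length ≤ ids.length := le_of_eq hlen.symm
  have hfold := pv_fold_char names ids names.length hle
  have hrange : PySem.List.pyRange 0 ((names.length : Nat) : Int) 1 =
      (List.range names.length).map (fun (j : Nat) => (j : Int)) :=
    PySem.List.pyRange_zero_nat names.length
  dsimp only
  rw [hrange, hfold]
  have h1 : ids.length - 1 < ids.length := by omega
  have h2 : ids.length - 1 + 1 = names.length := by omega
  have hlast : pvLastNew ids (ids.length - 1) = (pvIdxs ids names.length).getLastD 0 := by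
    rw [pv_lastNew_eq ids (ids.length - 1) h1, h2]
  obtain ⟨m, hm⟩ : ∃ m, names.length = m + 1 := ⟨names.length - 1, by omega⟩
  have hcons : pvIdxs ids names.length = 0 :: ((List.range m).map Nat.succ).filter (pvNew ids) := by
    rw [hm]; exact pv_idxs_cons ids m
  rw [hlast, hcons]
  cases hrest : ((List.range m).map Nat.succ).filter (pvNew ids) with
  | nil => simp [pv_pyGetD_zero]
  | cons r rs =>
    have hAne : ((0 :: r :: rs).map (fun j => names.getD j [])) ≠ [] := by simp
    have hlen2 : ((0 :: r :: rs).map (fun j => names.getD j [])).length > 1 := by simp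
    rw [if_pos hlen2, pv_pyGetD_zero, pv_pyGetD_neg_one _ _ hAne]
    have hgl : ((0 :: r :: rs).map (fun j => names.getD j [])).getLastD ['-'] =
        names.getD ((0 :: r :: rs).getLastD 0) [] := by
      rw [List.getLastD_eq_getLast?, List.getLast?_map,
        List.getLast?_eq_some_getLast (show (0 :: r :: rs) ≠ [] by simp),
        List.getLastD_eq_getLast?,
        List.getLast?_eq_some_getLast (show (0 :: r :: rs) ≠ [] by simp)]
      rfl
    have htail : (0 :: r :: rs).getLastD 0 = (r :: rs).getLastD 0 := by
      simp [List.getLastD_eq_getLast?]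
    have hmem : (r :: rs).getLastD 0 ∈ r :: rs := by
      have heq : (r :: rs).getLastD 0 = (r :: rs).getLast (by simp) := by
        rw [List.getLastD_eq_getLast?, List.getLast?_eq_some_getLast (by simp)]
        rfl
      rw [heq]
      exact List.getLast_mem _
    have hgpos : 0 < (0 :: r :: rs).getLastD 0 := by
      rw [htail]
      have := pv_idxs_rest_pos ids m
      rw [hrest] at this
      exact this _ hmem
    rw [hgl, if_pos hgpos]
    simp

-- ===== VERDICT (by name: the statement is the Claim_ definition above) =====
theorem parse_ref_two_authors_spec : Claim_equal_parse_ref_two_authors := by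
  intro aunms auids _hdom hpre
  unfold Spec_parse_ref_two_authors
  unfold parse_ref_two_authors parse_ref_two_authors_alt
  by_cases hA : aunms.toList = []
  · rw [if_neg (by simpa using hA), if_pos hA]
  · rw [if_pos hA, if_neg hA]
    dsimp only
    have hpos : 0 < ((PySem.Chars.splitOn aunms.toList [';']).map (fun x => PySem.Chars.strip x)).length := by
      simp only [List.length_map]
      exact List.length_pos_iff.mpr (pv_splitOn_ne_nil _ _)
    by_cases hB : auids.toList = []
    · have hc : ¬ (auids.toList ≠ []) := fun hc => hc hB
      rw [if_neg hc]
      refine pv_core _ _ ?_ hpos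
      simp [PySem.List.length_pyRange_one]
    · have hc : auids.toList ≠ [] := hB
      rw [if_pos hc]
      refine pv_core _ _ ?_ hpos
      simp only [List.length_map]
      exact (hpre hA hB).symm
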